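-- pv_equiv track=rewrite | github.com/jiseungmin/Algorithm | software_maestro_test/구현/6.py | solution
-- ===== SOURCE A (Python) =====
-- def insert(key, lock, start_i, start_j, end):
--     lenght = (2*len(key))+len(lock)-2  # 행렬 백터의 길이
--     background = [[0 for i in range(lenght)]
--                   for j in range(lenght)]  # 만들어진 행렬백터
--
--     for i in range(len(key)):  # key를 먼저 background에 넣는다.
--         for j in range(len(key)):
--             background[start_i+i][start_j+j] = key[i][j]
--
--     for i in range(len(key)-1, end):  # 그리고 Lock를 key가 넣어진 background에 더해준다.
--         for j in range(len(key)-1, end):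
--             background[i][j] += lock[i-len(key)+1][j-len(key)+1]
--             if background[i][j] != 1:  # 만약 1이 아닌 경우가 있다면 False 리턴
--                 return False
--
--     return True
--
-- def rotate(key):
--     back_key = [[0]*(len(key)) for i in range(len(key))]
--     reverse = len(key)-1
--     for i in range(len(key)):
--         for j in range(len(key)):
--             back_key[j][reverse] = key[i][j]
--         reverse -= 1
--
--     return back_key
--
-- def solution(key, lock):
--     end = len(key) + len(lock) - 1
--     for k in range(4):
--         for i in range(end):
--             for j in range(end):
--                 start_i = i  # key 삽입 시작 위치 (Y)
--                 start_j = j  # key 삽입 시작 위치 (X)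
--                 if insert(key, lock, start_i, start_j, end) == True:
--                     return True
--         key = rotate(key)  # Key 회전 실시
--     return False
-- ===== SOURCE B (Python) =====
-- # B: convolution-style counting. For each rotation it builds, in one pass over all
-- # (lock cell, key cell) pairs, displacement-indexed counters of "breaking" overlaps
-- # (sum != 1) and "fixing" overlaps (lock != 1 covered with sum == 1); an offset works
-- # iff its displacement has zero breaks and fixes every non-1 lock cell. No per-offset
-- # rescan and no background matrix.
--
-- def solution(key, lock):
--     K, N = len(key), len(lock)
--     end = K + N - 1
--     required = sum(1 for r in range(N) for c in range(N) if lock[r][c] != 1)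
--     k = key
--     for _ in range(4):
--         brkL = [(r - ki, c - kj)
--                 for r in range(N) for c in range(N)
--                 for ki in range(K) for kj in range(K)
--                 if lock[r][c] + k[ki][kj] != 1]
--         fixL = [(r - ki, c - kj)
--                 for r in range(N) for c in range(N)
--                 for ki in range(K) for kj in range(K)
--                 if lock[r][c] != 1 and lock[r][c] + k[ki][kj] == 1]
--         brk = {}
--         for d in brkL:
--             brk[d] = brk.get(d, 0) + 1
--         fix = {}
--         for d in fixL:
--             fix[d] = fix.get(d, 0) + 1
--         for si in range(end):
--             for sj in range(end):
--                 d = (si - K + 1, sj - K + 1)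
--                 if brk.get(d, 0) == 0 and fix.get(d, 0) == required:
--                     return True
--         k = [[k[K - 1 - c][r] for c in range(K)] for r in range(K)]
--     return False
-- ===== Notes on version B (the rewrite author's own statement) =====
-- stated objective: faster
-- what changed: B replaces A's per-offset rescan (rebuilding and checking a (2K+N-2)^2 background for each of the 4*(K+N-1)^2 placements) by a convolution-style count: one pass over all (lock cell, key cell) pairs per rotation builds displacement-indexed counters of breaking overlaps (sum != 1) and fixing overlaps (non-1 lock cell made 1), and each offset is answered by two dict lookups (zero breaks and required fixes).
-- outside the precondition, e.g. on solution([], [[1, 1, 1], [1, 1, 1], [1, 1, 1]]): A returns False, B returns True; on solution([], [[1, 1], [1, 1]]): A raises IndexError, B returns True; on solution([[0]], [[5, 5], [5]]): A returns False, B raises IndexError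
import Mathlib
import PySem

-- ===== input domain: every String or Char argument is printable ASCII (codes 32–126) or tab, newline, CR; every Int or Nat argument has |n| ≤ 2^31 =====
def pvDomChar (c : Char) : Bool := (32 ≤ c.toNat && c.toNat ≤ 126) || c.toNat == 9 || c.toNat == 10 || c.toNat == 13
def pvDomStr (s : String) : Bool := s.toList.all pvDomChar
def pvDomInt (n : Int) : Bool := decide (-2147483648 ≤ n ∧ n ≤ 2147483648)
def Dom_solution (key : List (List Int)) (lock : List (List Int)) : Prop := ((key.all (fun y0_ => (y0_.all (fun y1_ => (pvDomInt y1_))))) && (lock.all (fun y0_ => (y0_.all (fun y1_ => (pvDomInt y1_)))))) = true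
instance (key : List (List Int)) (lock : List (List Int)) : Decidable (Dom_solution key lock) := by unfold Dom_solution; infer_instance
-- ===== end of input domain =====

-- B replaces A's try-every-offset-and-rescan search by a convolution-style count: one
-- pass over all (lock cell, key cell) pairs builds displacement-indexed counters of
-- breaking and fixing overlaps, and each offset is then answered by two dict lookups.

-- shared 2-D indexing helper (Python m[i][j] read / write; exact on the in-range
-- accesses Pre_ admits)
def get2 (m : List (List Int)) (i j : Int) : Int :=
  PySem.List.pyGetD (PySem.List.pyGetD m i []) j 0
def set2 (m : List (List Int)) (i j : Int) (v : Int) : List (List Int) :=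
  PySem.List.pySetD m i (PySem.List.pySetD (PySem.List.pyGetD m i []) j v)

-- ===== PORT A =====
def lockColsA (lock : List (List Int)) (K i : Int) :
    List (List Int) → List Int → Option (List (List Int))
  | bg, [] => some bg
  | bg, j :: js =>
    let bg' := set2 bg i j (get2 bg i j + get2 lock (i - K + 1) (j - K + 1))
    if get2 bg' i j ≠ 1 then none else lockColsA lock K i bg' js

def lockRowsA (lock : List (List Int)) (K : Int) (cols : List Int) :
    List (List Int) → List Int → Option (List (List Int))
  | bg, [] => some bg
  | bg, i :: is =>
    match lockColsA lock K i bg cols with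
    | none => none
    | some bg' => lockRowsA lock K cols bg' is

def insertA (key lock : List (List Int)) (start_i start_j endv : Int) : Bool :=
  let K : Int := key.length
  let lenght : Int := 2 * K + (lock.length : Int) - 2
  let bg0 : List (List Int) := List.replicate lenght.toNat (List.replicate lenght.toNat 0)
  let bg1 := (PySem.List.pyRange 0 K 1).foldl (fun bg i =>
      (PySem.List.pyRange 0 K 1).foldl (fun bg j =>
        set2 bg (start_i + i) (start_j + j) (get2 key i j)) bg) bg0
  (lockRowsA lock K (PySem.List.pyRange (K - 1) endv 1) bg1
    (PySem.List.pyRange (K - 1) endv 1)).isSome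

def rotateA (key : List (List Int)) : List (List Int) :=
  let K : Int := key.length
  let bk0 : List (List Int) := List.replicate key.length (List.replicate key.length 0)
  (PySem.List.pyRange 0 K 1).foldl (fun bk i =>
    (PySem.List.pyRange 0 K 1).foldl (fun bk j =>
      set2 bk j (K - 1 - i) (get2 key i j)) bk) bk0

def scanA (key lock : List (List Int)) (endv : Int) : Bool :=
  (PySem.List.pyRange 0 endv 1).any fun i =>
    (PySem.List.pyRange 0 endv 1).any fun j => insertA key lock i j endv

def solLoopA (lock : List (List Int)) (endv : Int) : List (List Int) → Nat → Bool
  | _, 0 => false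
  | key, n + 1 => if scanA key lock endv then true else solLoopA lock endv (rotateA key) n

def solution (key : List (List Int)) (lock : List (List Int)) : Bool :=
  solLoopA lock ((key.length : Int) + (lock.length : Int) - 1) key 4


-- ===== PORT B =====
-- list of displacements (r-ki, c-kj) at which a key cell lands on a lock cell and BREAKS it
def brkListB (k lock : List (List Int)) (K N : Int) : List (Int × Int) :=
  (PySem.List.pyRange 0 N 1).flatMap fun r =>
    (PySem.List.pyRange 0 N 1).flatMap fun c =>
      (PySem.List.pyRange 0 K 1).flatMap fun ki =>
        (PySem.List.pyRange 0 K 1).flatMap fun kj =>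
          if get2 lock r c + get2 k ki kj ≠ 1 then [(r - ki, c - kj)] else []

-- displacements at which a key cell FIXES a non-1 lock cell (sum becomes 1)
def fixListB (k lock : List (List Int)) (K N : Int) : List (Int × Int) :=
  (PySem.List.pyRange 0 N 1).flatMap fun r =>
    (PySem.List.pyRange 0 N 1).flatMap fun c =>
      (PySem.List.pyRange 0 K 1).flatMap fun ki =>
        (PySem.List.pyRange 0 K 1).flatMap fun kj =>
          if get2 lock r c ≠ 1 ∧ get2 lock r c + get2 k ki kj = 1 then [(r - ki, c - kj)] else []

-- required = sum(1 for r in range(N) for c in range(N) if lock[r][c] != 1)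
def requiredB (lock : List (List Int)) (N : Int) : Int :=
  (((PySem.List.pyRange 0 N 1).flatMap fun r =>
      (PySem.List.pyRange 0 N 1).filter fun c => get2 lock r c != 1).length : Int)

-- k = [[k[K-1-c][r] for c in range(K)] for r in range(K)]
def rotB (K : Int) (k : List (List Int)) : List (List Int) :=
  (PySem.List.pyRange 0 K 1).map fun r =>
    (PySem.List.pyRange 0 K 1).map fun c => get2 k (K - 1 - c) r

def solLoopB (lock : List (List Int)) (K N endv required : Int) :
    List (List Int) → Nat → Bool
  | _, 0 => false
  | k, n + 1 =>
    let brk := PySem.Dict.counter (brkListB k lock K N)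
    let fix := PySem.Dict.counter (fixListB k lock K N)
    if (PySem.List.pyRange 0 endv 1).any (fun si =>
        (PySem.List.pyRange 0 endv 1).any fun sj =>
          let d := (si - K + 1, sj - K + 1)
          brk.getD d 0 == 0 && fix.getD d 0 == required)
    then true
    else solLoopB lock K N endv required (rotB K k) n

def solution_alt (key : List (List Int)) (lock : List (List Int)) : Bool :=
  let K : Int := key.length
  let N : Int := lock.length
  solLoopB lock K N (K + N - 1) (requiredB lock N) key 4

-- ===== PRECONDITION & SPEC =====
-- Pre_ excludes the empty key with a lock of height ≥ 2 (A indexes an undersized background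
-- with Python's negative wraparound, raising IndexError or returning accidental values) and
-- ragged matrices with a row shorter than the matrix height (A and B generally raise
-- IndexError there; where A's early exit returns first, the value is an artefact of scan
-- order, and B raises).
def Pre_solution (key : List (List Int)) (lock : List (List Int)) : Prop :=
  (key = [] → lock.length ≤ 1) ∧
  (∀ row ∈ key, key.length ≤ row.length) ∧
  (∀ row ∈ lock, lock.length ≤ row.length)
instance (key : List (List Int)) (lock : List (List Int)) : Decidable (Pre_solution key lock) := by
  unfold Pre_solution; infer_instance

def pvWitness_solution : List (List Int) × List (List Int) :=
  ([[0, 0], [0, 1]], [[1, 1], [1, 0]])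

def Spec_solution (key : List (List Int)) (lock : List (List Int)) (out : Bool) : Prop := out = solution_alt key lock
instance (key : List (List Int)) (lock : List (List Int)) (out : Bool) : Decidable (Spec_solution key lock out) := by unfold Spec_solution; infer_instance

-- ===== CLAIM (what is proved, stated in full; the proofs are below) =====
def Claim_equal_solution : Prop := ∀ (key : List (List Int)) (lock : List (List Int)), Dom_solution key lock → Pre_solution key lock → Spec_solution key lock (solution key lock)

-- ===== LEMMAS AND PROOFS =====

-- A-side characterisation: check the N×N lock region directly at offset (si, sj)
def fitsB (key lock : List (List Int)) (si sj : Int) : Bool :=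
  let K : Int := key.length
  let N : Int := lock.length
  (PySem.List.pyRange 0 N 1).all fun r =>
    (PySem.List.pyRange 0 N 1).all fun c =>
      let a := K - 1 + r
      let b := K - 1 + c
      let v := get2 lock r c
      let v := if si ≤ a ∧ a < si + K ∧ sj ≤ b ∧ b < sj + K
               then v + get2 key (a - si) (b - sj) else v
      v == 1

def Sq (m : List (List Int)) (n : Nat) : Prop :=
  m.length = n ∧ ∀ row ∈ m, row.length = n

lemma getD_set_eq {α : Type} (l : List α) (i : Nat) (a d : α) (h : i < l.length) :
    (l.set i a).getD i d = a := by
  simp [List.getD_eq_getElem?_getD, h]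

lemma getD_set_ne {α : Type} (l : List α) (i k : Nat) (a d : α) (h : i ≠ k) :
    (l.set i a).getD k d = l.getD k d := by
  simp [List.getD_eq_getElem?_getD, List.getElem?_set_ne h]

lemma getD_in_range {α : Type} (l : List α) (i : Nat) (d : α) (h : i < l.length) :
    l.getD i d = l[i] := by
  simp [List.getD_eq_getElem?_getD, List.getElem?_eq_getElem h]

lemma get2_nonneg (m : List (List Int)) {i j : Int} (hi : 0 ≤ i) (hj : 0 ≤ j) :
    get2 m i j = (m.getD i.toNat []).getD j.toNat 0 := by
  simp [get2, PySem.List.pyGetD_of_nonneg _ _ hi, PySem.List.pyGetD_of_nonneg _ _ hj]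

lemma set2_nonneg (m : List (List Int)) {i j : Int} (v : Int) (hi : 0 ≤ i) (hj : 0 ≤ j) :
    set2 m i j v = m.set i.toNat ((m.getD i.toNat []).set j.toNat v) := by
  simp [set2, PySem.List.pySetD_of_nonneg _ _ hi, PySem.List.pySetD_of_nonneg _ _ hj,
    PySem.List.pyGetD_of_nonneg _ _ hi]

lemma Sq_set2 {m : List (List Int)} {n : Nat} {i j : Int} (v : Int)
    (hm : Sq m n) (hi : 0 ≤ i) (hj : 0 ≤ j) : Sq (set2 m i j v) n := by
  rw [set2_nonneg m v hi hj]
  by_cases hlt : i.toNat < m.length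
  · refine ⟨by simp [hm.1], ?_⟩
    intro row hrow
    rcases List.mem_or_eq_of_mem_set hrow with h | h
    · exact hm.2 _ h
    · subst h
      rw [List.length_set, getD_in_range _ _ _ hlt]
      exact hm.2 _ (List.getElem_mem hlt)
  · rw [List.set_eq_of_length_le (by omega)]
    exact hm

lemma get2_set2_eq {m : List (List Int)} {n : Nat} {i j : Int} (v : Int)
    (hm : Sq m n) (hi : 0 ≤ i) (hi' : i < (n : Int)) (hj : 0 ≤ j) (hj' : j < (n : Int)) :
    get2 (set2 m i j v) i j = v := by
  obtain ⟨hm1, hm2⟩ := hm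
  have hlen : i.toNat < m.length := by omega
  have hrowlen : j.toNat < (m.getD i.toNat []).length := by
    rw [getD_in_range _ _ _ hlen]
    have h2 := hm2 _ (List.getElem_mem hlen)
    omega
  rw [set2_nonneg m v hi hj, get2_nonneg _ hi hj, getD_set_eq _ _ _ _ (by simpa using hlen),
    getD_set_eq _ _ _ _ hrowlen]

lemma get2_set2_ne {m : List (List Int)} {i j a b : Int} (v : Int)
    (hi : 0 ≤ i) (hj : 0 ≤ j) (ha : 0 ≤ a) (hb : 0 ≤ b) (hne : a ≠ i ∨ b ≠ j) :
    get2 (set2 m i j v) a b = get2 m a b := by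
  rw [set2_nonneg m v hi hj, get2_nonneg _ ha hb, get2_nonneg _ ha hb]
  by_cases hrow : i.toNat = a.toNat
  · have hab : b.toNat ≠ j.toNat := by
      rcases hne with h | h
      · exfalso; omega
      · omega
    by_cases hlt : i.toNat < m.length
    · rw [← hrow, getD_set_eq _ _ _ _ hlt, getD_set_ne _ _ _ _ _ (fun h => hab h.symm)]
    · rw [List.set_eq_of_length_le (by omega)]
  · rw [getD_set_ne _ _ _ _ _ hrow]

lemma Sq_foldl {α : Type} (l : List α) (f : List (List Int) → α → List (List Int)) {n : Nat}
    (h : ∀ bg x, x ∈ l → Sq bg n → Sq (f bg x) n) {bg : List (List Int)} (hbg : Sq bg n) :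
    Sq (l.foldl f bg) n := by
  induction l generalizing bg with
  | nil => exact hbg
  | cons x xs ih =>
    exact ih (fun bg y hy hb => h bg y (List.mem_cons_of_mem _ hy) hb)
      (h bg x (List.mem_cons_self) hbg)

lemma get2_zeros (p q : Nat) {a b : Int} (ha : 0 ≤ a) (hb : 0 ≤ b) :
    get2 (List.replicate p (List.replicate q (0 : Int))) a b = 0 := by
  rw [get2_nonneg _ ha hb]
  rcases Nat.lt_or_ge a.toNat p with h | h
  · rw [getD_in_range (List.replicate p (List.replicate q (0 : Int))) a.toNat []
      (by simpa using h), List.getElem_replicate]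
    rcases Nat.lt_or_ge b.toNat q with h2 | h2
    · rw [getD_in_range (List.replicate q (0 : Int)) b.toNat 0 (by simpa using h2),
        List.getElem_replicate]
    · rw [List.getD_eq_getElem?_getD, List.getElem?_eq_none (by simpa using h2)]; rfl
  · rw [List.getD_eq_getElem?_getD (l := List.replicate p (List.replicate q (0 : Int))),
      List.getElem?_eq_none (by simpa using h)]
    rfl

lemma innerPlace (key : List (List Int)) {n : Nat} (si sj i : Int) (c : Nat)
    (bg : List (List Int)) (hbg : Sq bg n)
    (h1 : 0 ≤ si + i) (h2 : si + i < (n : Int)) (h3 : 0 ≤ sj) (h4 : sj + c ≤ (n : Int))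
    {a b : Int} (ha : 0 ≤ a) (hb : 0 ≤ b) :
    get2 ((PySem.List.pyRange 0 (c : Int) 1).foldl
        (fun bg j => set2 bg (si + i) (sj + j) (get2 key i j)) bg) a b
      = if a = si + i ∧ sj ≤ b ∧ b < sj + c then get2 key i (b - sj) else get2 bg a b := by
  induction c with
  | zero =>
    rw [PySem.List.pyRange_one_eq_nil (by omega)]
    simp only [List.foldl_nil]
    rw [if_neg (by omega)]
  | succ c ih =>
    have hc : ((c + 1 : Nat) : Int) = (c : Int) + 1 := by push_cast; ring
    rw [hc, PySem.List.pyRange_one_succ_right (by omega), List.foldl_append]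
    simp only [List.foldl_cons, List.foldl_nil]
    have hSqF : Sq ((PySem.List.pyRange 0 (c : Int) 1).foldl
        (fun bg j => set2 bg (si + i) (sj + j) (get2 key i j)) bg) n := by
      refine Sq_foldl _ _ (fun bg x hx hb => ?_) hbg
      have := (PySem.List.mem_pyRange_one).1 hx
      exact Sq_set2 _ hb (by omega) (by omega)
    by_cases hab : a = si + i ∧ b = sj + c
    · rw [hab.1, hab.2, get2_set2_eq _ hSqF (by omega) (by omega) (by omega) (by omega)]
      rw [if_pos (by constructor <;> omega)]
      have : sj + (c : Int) - sj = (c : Int) := by ring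
      rw [this]
    · rw [get2_set2_ne _ (by omega) (by omega) ha hb (by tauto)]
      rw [ih (by omega)]
      by_cases hcond : a = si + i ∧ sj ≤ b ∧ b < sj + c
      · rw [if_pos hcond, if_pos (by obtain ⟨x, y, z⟩ := hcond; exact ⟨x, y, by omega⟩)]
      · rw [if_neg hcond, if_neg (by intro ⟨x, y, z⟩; exact hcond ⟨x, y, by omega⟩)]

lemma Sq_innerPlace (key : List (List Int)) {n : Nat} (si sj i : Int) (c : Nat)
    {bg : List (List Int)} (hbg : Sq bg n) (h1 : 0 ≤ si) (h3 : 0 ≤ sj) (hi : 0 ≤ i) :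
    Sq ((PySem.List.pyRange 0 (c : Int) 1).foldl
      (fun bg j => set2 bg (si + i) (sj + j) (get2 key i j)) bg) n := by
  refine Sq_foldl _ _ (fun bg x hx hb => ?_) hbg
  have := (PySem.List.mem_pyRange_one).1 hx
  exact Sq_set2 _ hb (by omega) (by omega)

lemma outerPlace (key : List (List Int)) {n : Nat} (si sj : Int) (t : Nat)
    (bg : List (List Int)) (hbg : Sq bg n)
    (h0 : 0 ≤ si) (h1 : si + t ≤ (n : Int)) (h2 : 0 ≤ sj) (h3 : sj + key.length ≤ (n : Int))
    {a b : Int} (ha : 0 ≤ a) (hb : 0 ≤ b) :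
    get2 ((PySem.List.pyRange 0 (t : Int) 1).foldl (fun bg i =>
        (PySem.List.pyRange 0 (key.length : Int) 1).foldl
          (fun bg j => set2 bg (si + i) (sj + j) (get2 key i j)) bg) bg) a b
      = if si ≤ a ∧ a < si + t ∧ sj ≤ b ∧ b < sj + (key.length : Int)
        then get2 key (a - si) (b - sj) else get2 bg a b := by
  induction t with
  | zero =>
    rw [PySem.List.pyRange_one_eq_nil (show ((0 : Nat) : Int) ≤ 0 by omega)]
    simp only [List.foldl_nil]
    rw [if_neg (by omega)]
  | succ t ih =>
    have hc : ((t + 1 : Nat) : Int) = (t : Int) + 1 := by push_cast; ring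
    rw [hc, PySem.List.pyRange_one_succ_right (by omega), List.foldl_append]
    simp only [List.foldl_cons, List.foldl_nil]
    have hSqF : Sq ((PySem.List.pyRange 0 (t : Int) 1).foldl (fun bg i =>
        (PySem.List.pyRange 0 (key.length : Int) 1).foldl
          (fun bg j => set2 bg (si + i) (sj + j) (get2 key i j)) bg) bg) n := by
      refine Sq_foldl _ _ (fun bg x hx hb => ?_) hbg
      have := (PySem.List.mem_pyRange_one).1 hx
      exact Sq_innerPlace key si sj x key.length hb h0 h2 (by omega)
    rw [innerPlace key si sj (t : Int) key.length _ hSqF (by omega) (by omega) h2 h3 ha hb]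
    by_cases hlast : a = si + (t : Int) ∧ sj ≤ b ∧ b < sj + (key.length : Int)
    · rw [if_pos hlast, if_pos (by omega)]
      have hts : a - si = (t : Int) := by omega
      rw [hts]
    · rw [if_neg hlast, ih (by omega)]
      by_cases hcond : si ≤ a ∧ a < si + (t : Int) ∧ sj ≤ b ∧ b < sj + (key.length : Int)
      · rw [if_pos hcond, if_pos (by omega)]
      · rw [if_neg hcond, if_neg (by omega)]

lemma innerRot (key : List (List Int)) {n : Nat} (K1 i : Int) (c : Nat)
    (bk : List (List Int)) (hbk : Sq bk n)
    (hc0 : 0 ≤ K1 - i) (hc1 : K1 - i < (n : Int)) (hc : c ≤ n)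
    {a b : Int} (ha : 0 ≤ a) (hb : 0 ≤ b) :
    get2 ((PySem.List.pyRange 0 (c : Int) 1).foldl
        (fun bk j => set2 bk j (K1 - i) (get2 key i j)) bk) a b
      = if a < (c : Int) ∧ b = K1 - i then get2 key i a else get2 bk a b := by
  induction c with
  | zero =>
    rw [PySem.List.pyRange_one_eq_nil (show ((0 : Nat) : Int) ≤ 0 by omega)]
    simp only [List.foldl_nil]
    rw [if_neg (by omega)]
  | succ c ih =>
    have hcast : ((c + 1 : Nat) : Int) = (c : Int) + 1 := by push_cast; ring
    rw [hcast, PySem.List.pyRange_one_succ_right (by omega), List.foldl_append]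
    simp only [List.foldl_cons, List.foldl_nil]
    have hSqF : Sq ((PySem.List.pyRange 0 (c : Int) 1).foldl
        (fun bk j => set2 bk j (K1 - i) (get2 key i j)) bk) n := by
      refine Sq_foldl _ _ (fun bk x hx hb => ?_) hbk
      have := (PySem.List.mem_pyRange_one).1 hx
      exact Sq_set2 _ hb (by omega) (by omega)
    by_cases hab : a = (c : Int) ∧ b = K1 - i
    · rw [hab.1, hab.2, get2_set2_eq _ hSqF (by omega) (by omega) (by omega) (by omega)]
      rw [if_pos (by omega)]
    · rw [get2_set2_ne _ (by omega) (by omega) ha hb (by tauto)]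
      rw [ih (by omega)]
      by_cases hcond : a < (c : Int) ∧ b = K1 - i
      · rw [if_pos hcond, if_pos (by omega)]
      · rw [if_neg hcond, if_neg (by omega)]

lemma outerRot (key : List (List Int)) {n : Nat} (K1 : Int) (t : Nat)
    (bk : List (List Int)) (hbk : Sq bk n)
    (ht : (t : Int) ≤ K1 + 1) (hK1 : K1 < (n : Int)) (hklen : key.length ≤ n)
    {a b : Int} (ha : 0 ≤ a) (hb : 0 ≤ b) :
    get2 ((PySem.List.pyRange 0 (t : Int) 1).foldl (fun bk i =>
        (PySem.List.pyRange 0 (key.length : Int) 1).foldl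
          (fun bk j => set2 bk j (K1 - i) (get2 key i j)) bk) bk) a b
      = if a < (key.length : Int) ∧ K1 - t < b ∧ b ≤ K1
        then get2 key (K1 - b) a else get2 bk a b := by
  induction t with
  | zero =>
    rw [PySem.List.pyRange_one_eq_nil (show ((0 : Nat) : Int) ≤ 0 by omega)]
    simp only [List.foldl_nil]
    rw [if_neg (by omega)]
  | succ t ih =>
    have hcast : ((t + 1 : Nat) : Int) = (t : Int) + 1 := by push_cast; ring
    rw [hcast, PySem.List.pyRange_one_succ_right (by omega), List.foldl_append]
    simp only [List.foldl_cons, List.foldl_nil]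
    have hSqF : Sq ((PySem.List.pyRange 0 (t : Int) 1).foldl (fun bk i =>
        (PySem.List.pyRange 0 (key.length : Int) 1).foldl
          (fun bk j => set2 bk j (K1 - i) (get2 key i j)) bk) bk) n := by
      refine Sq_foldl _ _ (fun bk x hx hb => ?_) hbk
      have hx' := (PySem.List.mem_pyRange_one).1 hx
      refine Sq_foldl _ _ (fun bk y hy hb2 => ?_) hb
      have := (PySem.List.mem_pyRange_one).1 hy
      exact Sq_set2 _ hb2 (by omega) (by omega)
    rw [innerRot key K1 (t : Int) key.length _ hSqF (by omega) (by omega) hklen ha hb]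
    by_cases hlast : a < (key.length : Int) ∧ b = K1 - (t : Int)
    · rw [if_pos hlast, if_pos (by omega)]
      have : K1 - b = (t : Int) := by omega
      rw [this]
    · rw [if_neg hlast, ih (by omega)]
      by_cases hcond : a < (key.length : Int) ∧ K1 - (t : Int) < b ∧ b ≤ K1
      · rw [if_pos hcond, if_pos (by omega)]
      · rw [if_neg hcond, if_neg (by omega)]

lemma Sq_replicate (n : Nat) : Sq (List.replicate n (List.replicate n (0 : Int))) n := by
  constructor
  · simp
  · intro row hrow; simp [List.eq_of_mem_replicate hrow]

lemma getElem_eq_get2 {m : List (List Int)} (r c : Nat)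
    (hr : r < m.length) (hc : c < m[r].length) :
    m[r][c] = get2 m (r : Int) (c : Int) := by
  rw [get2_nonneg _ (by positivity) (by positivity), Int.toNat_natCast, Int.toNat_natCast,
    getD_in_range m r [] hr, getD_in_range _ c 0 hc]

lemma Sq_rotateA (key : List (List Int)) : Sq (rotateA key) key.length := by
  unfold rotateA
  refine Sq_foldl _ _ (fun bk x hx hb => ?_) (Sq_replicate key.length)
  have hx' := (PySem.List.mem_pyRange_one).1 hx
  refine Sq_foldl _ _ (fun bk y hy hb2 => ?_) hb
  have := (PySem.List.mem_pyRange_one).1 hy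
  exact Sq_set2 _ hb2 (by omega) (by omega)

lemma length_rotB (K : Int) (key : List (List Int)) : (rotB K key).length = K.toNat := by
  simp [rotB, PySem.List.length_pyRange_one]

lemma rotateA_eq (key : List (List Int)) : rotateA key = rotB (key.length : Int) key := by
  have hSq := Sq_rotateA key
  apply List.ext_getElem (by rw [hSq.1, length_rotB]; simp)
  intro r h1 h2
  have hr : r < key.length := by rw [hSq.1] at h1; exact h1
  have hrowA : (rotateA key)[r].length = key.length :=
    hSq.2 _ (List.getElem_mem h1)
  have hrowB : (rotB (key.length : Int) key)[r] =
      (PySem.List.pyRange 0 (key.length : Int) 1).map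
        (fun c => get2 key ((key.length : Int) - 1 - c) (0 + (r : Int))) := by
    simp only [rotB, List.getElem_map, PySem.List.getElem_pyRange_one]
  apply List.ext_getElem (by rw [hrowA, hrowB]; simp [PySem.List.length_pyRange_one])
  intro c hc1 hc2
  have hcK : c < key.length := by rw [hrowA] at hc1; exact hc1
  rw [getElem_eq_get2 r c h1 hc1]
  have hA : get2 (rotateA key) (r : Int) (c : Int) = get2 key ((key.length : Int) - 1 - c) r := by
    show get2 ((PySem.List.pyRange 0 ((key.length : Nat) : Int) 1).foldl (fun bk i =>
        (PySem.List.pyRange 0 ((key.length : Nat) : Int) 1).foldl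
          (fun bk j => set2 bk j (((key.length : Nat) : Int) - 1 - i) (get2 key i j)) bk)
        (List.replicate key.length (List.replicate key.length 0))) (r : Int) (c : Int) = _
    rw [outerRot key ((key.length : Int) - 1) key.length _ (Sq_replicate key.length)
      (by omega) (by omega) (le_refl _) (by positivity) (by positivity)]
    rw [if_pos (by constructor <;> omega)]
  rw [hA]
  simp only [List.getElem_of_eq hrowB, List.getElem_map, PySem.List.getElem_pyRange_one]
  norm_num

lemma lockCols_spec (lock : List (List Int)) (Kv : Int) {n : Nat} (p : Int → Int) (i : Int)
    (hi0 : 0 ≤ i) (hi1 : i < (n : Int)) :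
    ∀ (js : List Int) (bg : List (List Int)), Sq bg n → js.Nodup →
      (∀ j ∈ js, 0 ≤ j ∧ j < (n : Int)) →
      (∀ j ∈ js, get2 bg i j = p j) →
      ((lockColsA lock Kv i bg js).isSome
          = js.all (fun j => ((p j + get2 lock (i - Kv + 1) (j - Kv + 1)) == 1))
        ∧ ∀ bg', lockColsA lock Kv i bg js = some bg' →
            Sq bg' n ∧ ∀ a b : Int, 0 ≤ a → 0 ≤ b → a ≠ i → get2 bg' a b = get2 bg a b) := by
  intro js
  induction js with
  | nil =>
    intro bg hbg _ _ _
    refine ⟨rfl, fun bg' h => ?_⟩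
    simp only [lockColsA] at h
    cases h
    exact ⟨hbg, fun _ _ _ _ _ => rfl⟩
  | cons j js ih =>
    intro bg hbg hnd hjr hinv
    have hj := hjr j (List.mem_cons_self)
    have hbg' : Sq (set2 bg i j (get2 bg i j + get2 lock (i - Kv + 1) (j - Kv + 1))) n :=
      Sq_set2 _ hbg hi0 hj.1
    have hval : get2 (set2 bg i j (get2 bg i j + get2 lock (i - Kv + 1) (j - Kv + 1))) i j
        = p j + get2 lock (i - Kv + 1) (j - Kv + 1) := by
      rw [get2_set2_eq _ hbg hi0 hi1 hj.1 hj.2, hinv j (List.mem_cons_self)]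
    simp only [lockColsA, hval]
    by_cases hone : p j + get2 lock (i - Kv + 1) (j - Kv + 1) = 1
    · rw [if_neg (by omega)]
      have hinv' : ∀ j' ∈ js, get2 (set2 bg i j (get2 bg i j + get2 lock (i - Kv + 1) (j - Kv + 1))) i j' = p j' := by
        intro j' hj'
        have hne : j' ≠ j := fun h => (List.nodup_cons.1 hnd).1 (h ▸ hj')
        rw [get2_set2_ne _ hi0 hj.1 hi0 (hjr j' (List.mem_cons_of_mem _ hj')).1 (Or.inr hne),
          hinv j' (List.mem_cons_of_mem _ hj')]
      obtain ⟨hall, hpres⟩ := ih _ hbg' (List.nodup_cons.1 hnd).2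
        (fun j' hj' => hjr j' (List.mem_cons_of_mem _ hj')) hinv'
      constructor
      · rw [hall, List.all_cons]
        have : (p j + get2 lock (i - Kv + 1) (j - Kv + 1) == 1) = true := by
          simp [hone]
        rw [this, Bool.true_and]
      · intro bg' h
        obtain ⟨hsq, hpr⟩ := hpres bg' h
        refine ⟨hsq, fun a b ha hb hne => ?_⟩
        rw [hpr a b ha hb hne, get2_set2_ne _ hi0 hj.1 ha hb (Or.inl hne)]
    · rw [if_pos (by omega)]
      constructor
      · rw [List.all_cons]
        have : (p j + get2 lock (i - Kv + 1) (j - Kv + 1) == 1) = false := by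
          simp [hone]
        rw [this, Bool.false_and]
        rfl
      · intro bg' h; cases h

lemma lockRows_spec (lock : List (List Int)) (Kv : Int) {n : Nat} (p : Int → Int → Int)
    (js : List Int) (hjr : ∀ j ∈ js, 0 ≤ j ∧ j < (n : Int)) (hjnd : js.Nodup) :
    ∀ (is : List Int) (bg : List (List Int)), Sq bg n → is.Nodup →
      (∀ i ∈ is, 0 ≤ i ∧ i < (n : Int)) →
      (∀ i ∈ is, ∀ j ∈ js, get2 bg i j = p i j) →
      (lockRowsA lock Kv js bg is).isSome
        = is.all (fun i => js.all (fun j =>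
            ((p i j + get2 lock (i - Kv + 1) (j - Kv + 1)) == 1))) := by
  intro is
  induction is with
  | nil => intro bg _ _ _ _; rfl
  | cons i is ih =>
    intro bg hbg hnd hir hinv
    have hi := hir i (List.mem_cons_self)
    obtain ⟨hall, hpres⟩ := lockCols_spec lock Kv (p i) i hi.1 hi.2 js bg hbg hjnd hjr
      (fun j hj => hinv i (List.mem_cons_self) j hj)
    simp only [lockRowsA]
    cases hres : lockColsA lock Kv i bg js with
    | none =>
      have : js.all (fun j => ((p i j + get2 lock (i - Kv + 1) (j - Kv + 1)) == 1)) = false := by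
        rw [← hall, hres]; rfl
      rw [List.all_cons, this, Bool.false_and]
      rfl
    | some bg' =>
      obtain ⟨hsq, hpr⟩ := hpres bg' hres
      have hhead : js.all (fun j => ((p i j + get2 lock (i - Kv + 1) (j - Kv + 1)) == 1)) = true := by
        rw [← hall, hres]; rfl
      have hinv' : ∀ i' ∈ is, ∀ j ∈ js, get2 bg' i' j = p i' j := by
        intro i' hi' j hj
        have hne : i' ≠ i := fun h => (List.nodup_cons.1 hnd).1 (h ▸ hi')
        rw [hpr i' j (hir i' (List.mem_cons_of_mem _ hi')).1 (hjr j hj).1 hne,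
          hinv i' (List.mem_cons_of_mem _ hi') j hj]
      rw [List.all_cons, hhead, Bool.true_and]
      exact ih bg' hsq (List.nodup_cons.1 hnd).2
        (fun i' hi' => hir i' (List.mem_cons_of_mem _ hi')) hinv'

lemma insertA_eq_fitsB (key lock : List (List Int)) (si sj : Int)
    (hsi : 0 ≤ si) (hsi' : si < (key.length : Int) + (lock.length : Int) - 1)
    (hsj : 0 ≤ sj) (hsj' : sj < (key.length : Int) + (lock.length : Int) - 1)
    (hK : 1 ≤ key.length ∨ lock.length = 0) :
    insertA key lock si sj ((key.length : Int) + (lock.length : Int) - 1)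
      = fitsB key lock si sj := by
  rcases Nat.eq_zero_or_pos lock.length with hN | hN
  · simp only [insertA, fitsB, hN, Nat.cast_zero]
    rw [PySem.List.pyRange_one_eq_nil (by omega),
      PySem.List.pyRange_one_eq_nil (show (0 : Int) ≤ 0 by omega)]
    rfl
  · have hK1 : 1 ≤ key.length := by
      rcases hK with h | h
      · exact h
      · omega
    simp only [insertA, fitsB]
    set K' : Int := (key.length : Int) with hKdef
    set N' : Int := (lock.length : Int) with hNdef
    have hK' : 1 ≤ K' := by omega
    have hN' : 1 ≤ N' := by omega
    set n : Nat := (2 * K' + N' - 2).toNat with hndef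
    have hn : (n : Int) = 2 * K' + N' - 2 := by omega
    set P : Int → Int → Int := fun a b =>
      if si ≤ a ∧ a < si + K' ∧ sj ≤ b ∧ b < sj + K' then get2 key (a - si) (b - sj) else 0
      with hPdef
    have hbg1 : ∀ a b : Int, 0 ≤ a → 0 ≤ b →
        get2 ((PySem.List.pyRange 0 K' 1).foldl (fun bg i =>
          (PySem.List.pyRange 0 K' 1).foldl (fun bg j =>
            set2 bg (si + i) (sj + j) (get2 key i j)) bg)
          (List.replicate n (List.replicate n 0))) a b = P a b := by
      intro a b ha hb
      have := outerPlace key (n := n) si sj key.length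
        (List.replicate n (List.replicate n 0)) (Sq_replicate n)
        hsi (by omega) hsj (by omega) ha hb
      rw [← hKdef] at this
      rw [this, hPdef]
      simp only []
      by_cases hcond : si ≤ a ∧ a < si + K' ∧ sj ≤ b ∧ b < sj + K'
      · rw [if_pos hcond, if_pos hcond]
      · rw [if_neg hcond, if_neg hcond, get2_zeros _ _ ha hb]
    rw [lockRows_spec lock K' (n := n) P (PySem.List.pyRange (K' - 1) (K' + N' - 1) 1)
      (fun j hj => by
        have := (PySem.List.mem_pyRange_one).1 hj
        exact ⟨by omega, by omega⟩)
      (PySem.List.nodup_pyRange_one _ _)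
      _ _
      (by
        refine Sq_foldl _ _ (fun bg x hx hb => ?_) (Sq_replicate n)
        have hx' := (PySem.List.mem_pyRange_one).1 hx
        refine Sq_foldl _ _ (fun bg y hy hb2 => ?_) hb
        have := (PySem.List.mem_pyRange_one).1 hy
        exact Sq_set2 _ hb2 (by omega) (by omega))
      (PySem.List.nodup_pyRange_one _ _)
      (fun i hi => by
        have := (PySem.List.mem_pyRange_one).1 hi
        exact ⟨by omega, by omega⟩)
      (fun i hi j hj => by
        have h1 := (PySem.List.mem_pyRange_one).1 hi
        have h2 := (PySem.List.mem_pyRange_one).1 hj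
        exact hbg1 i j (by omega) (by omega))]
    rw [PySem.List.pyRange_one (K' - 1) (K' + N' - 1), PySem.List.pyRange_one 0 N']
    have hcnt : (K' + N' - 1 - (K' - 1)).toNat = lock.length := by omega
    have hcnt2 : (N' - 0).toNat = lock.length := by omega
    rw [hcnt, hcnt2, List.all_map, List.all_map]
    apply congrArg
    funext k
    simp only [Function.comp_apply]
    rw [List.all_map, List.all_map]
    apply congrArg
    funext c
    simp only [Function.comp_apply]
    have e1 : K' - 1 + (k : Int) - K' + 1 = (k : Int) := by ring
    have e2 : K' - 1 + (c : Int) - K' + 1 = (c : Int) := by ring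
    have e3 : (0 : Int) + (k : Int) = (k : Int) := by ring
    have e4 : (0 : Int) + (c : Int) = (c : Int) := by ring
    rw [e1, e2, e3, e4, hPdef]
    by_cases hcond : si ≤ K' - 1 + (k : Int) ∧ K' - 1 + (k : Int) < si + K'
        ∧ sj ≤ K' - 1 + (c : Int) ∧ K' - 1 + (c : Int) < sj + K'
    · simp only [if_pos hcond]
      rw [Int.add_comm]
    · simp only [if_neg hcond]
      rw [Int.zero_add]

-- ============ counting machinery for B ============

lemma sum_map_pin_aux (n : Nat) : ∀ (a b t : Int) (g : Int → Nat), (b - a).toNat = n →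
    ((PySem.List.pyRange a b 1).map (fun x => if x = t then g x else 0)).sum
      = if a ≤ t ∧ t < b then g t else 0 := by
  induction n with
  | zero =>
    intro a b t g h
    rw [PySem.List.pyRange_one_eq_nil (by omega), if_neg (by omega)]
    rfl
  | succ n ih =>
    intro a b t g h
    rw [PySem.List.pyRange_one_cons (by omega), List.map_cons, List.sum_cons,
      ih (a + 1) b t g (by omega)]
    by_cases hat : a = t
    · rw [if_pos hat, if_neg (by omega), if_pos (by omega), hat]
      omega
    · rw [if_neg hat]
      by_cases hc : a + 1 ≤ t ∧ t < b
      · rw [if_pos hc, if_pos (by omega)]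
        omega
      · rw [if_neg hc, if_neg (by omega)]

lemma sum_map_pin (a b t : Int) (g : Int → Nat) :
    ((PySem.List.pyRange a b 1).map (fun x => if x = t then g x else 0)).sum
      = if a ≤ t ∧ t < b then g t else 0 :=
  sum_map_pin_aux _ a b t g rfl

lemma sum_pin_if (a b t : Int) (q : Int → Prop) [DecidablePred q] :
    ((PySem.List.pyRange a b 1).map (fun x => if x = t ∧ q x then 1 else 0)).sum
      = if a ≤ t ∧ t < b ∧ q t then 1 else 0 := by
  have hfun : (fun x : Int => if x = t ∧ q x then (1 : Nat) else 0)
      = fun x => if x = t then (if q x then 1 else 0) else 0 := by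
    funext x
    by_cases h1 : x = t <;> by_cases h2 : q x <;> simp [h1, h2]
  rw [hfun, sum_map_pin]
  by_cases h1 : a ≤ t ∧ t < b
  · rw [if_pos h1]
    by_cases h2 : q t
    · rw [if_pos h2, if_pos ⟨h1.1, h1.2, h2⟩]
    · rw [if_neg h2, if_neg (fun h => h2 h.2.2)]
  · rw [if_neg h1, if_neg (fun h => h1 ⟨h.1, h.2.1⟩)]

lemma sum_map_eq_iff_of_le {α : Type} (l : List α) (f g : α → Nat)
    (h : ∀ x ∈ l, f x ≤ g x) :
    ((l.map f).sum = (l.map g).sum) ↔ ∀ x ∈ l, f x = g x := by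
  induction l with
  | nil => simp
  | cons x xs ih =>
    simp only [List.map_cons, List.sum_cons, List.mem_cons]
    have hx := h x (List.mem_cons_self)
    have hs : (xs.map f).sum ≤ (xs.map g).sum :=
      List.sum_le_sum (fun i hi => h i (List.mem_cons_of_mem _ hi))
    have hih := ih (fun y hy => h y (List.mem_cons_of_mem _ hy))
    constructor
    · intro he
      have h1 : f x = g x := by omega
      have h2 : (xs.map f).sum = (xs.map g).sum := by omega
      intro y hy
      rcases hy with rfl | hm
      · exact h1
      · exact (hih.1 h2) y hm
    · intro ha
      have h1 := ha x (Or.inl rfl)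
      have h2 := hih.2 (fun y hy => ha y (Or.inr hy))
      omega

lemma count_if_singleton (p : Prop) [Decidable p] (y t : Int × Int) :
    ((if p then [y] else []).count t) = if p ∧ y = t then 1 else 0 := by
  by_cases hp : p
  · by_cases hy : y = t
    · subst hy
      simp [hp]
    · simp [hp, hy]
  · simp [hp]

lemma count_inner2 (K r c di dj : Int) (Q : Int → Int → Prop)
    [inst : ∀ ki kj, Decidable (Q ki kj)] :
    (((PySem.List.pyRange 0 K 1).flatMap fun ki =>
        (PySem.List.pyRange 0 K 1).flatMap fun kj =>
          if Q ki kj then [(r - ki, c - kj)] else []).count (di, dj))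
      = if 0 ≤ r - di ∧ r - di < K ∧ 0 ≤ c - dj ∧ c - dj < K ∧ Q (r - di) (c - dj)
        then 1 else 0 := by
  rw [List.count_flatMap]
  have hper : ∀ ki : Int,
      (List.count (di, dj) ∘ fun ki =>
        (PySem.List.pyRange 0 K 1).flatMap fun kj =>
          if Q ki kj then [(r - ki, c - kj)] else []) ki
      = if ki = r - di ∧ (0 ≤ c - dj ∧ c - dj < K ∧ Q ki (c - dj)) then 1 else 0 := by
    intro ki
    simp only [Function.comp_apply]
    rw [List.count_flatMap]
    have h2 : ∀ kj : Int,
        (List.count (di, dj) ∘ fun kj => if Q ki kj then [(r - ki, c - kj)] else []) kj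
        = if kj = c - dj ∧ (ki = r - di ∧ Q ki kj) then 1 else 0 := by
      intro kj
      simp only [Function.comp_apply]
      rw [count_if_singleton]
      apply if_congr _ rfl rfl
      constructor
      · rintro ⟨hq, hpair⟩
        have ha : r - ki = di := congrArg Prod.fst hpair
        have hb : c - kj = dj := congrArg Prod.snd hpair
        exact ⟨by omega, by omega, hq⟩
      · rintro ⟨h1, h2, hq⟩
        exact ⟨hq, Prod.ext_iff.mpr ⟨by simp; omega, by simp; omega⟩⟩
    rw [List.map_congr_left (fun kj _ => h2 kj),
      sum_pin_if 0 K (c - dj) (fun kj => ki = r - di ∧ Q ki kj)]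
    apply if_congr _ rfl rfl
    constructor
    · rintro ⟨h1, h2, h3, h4⟩; exact ⟨h3, h1, h2, h4⟩
    · rintro ⟨h1, h2, h3, h4⟩; exact ⟨h2, h3, h1, h4⟩
  rw [List.map_congr_left (fun ki _ => hper ki),
    sum_pin_if 0 K (r - di) (fun ki => 0 ≤ c - dj ∧ c - dj < K ∧ Q ki (c - dj))]

lemma count_quad (N K di dj : Int) (P : Int → Int → Int → Int → Prop)
    [inst : ∀ r c ki kj, Decidable (P r c ki kj)] :
    (((PySem.List.pyRange 0 N 1).flatMap fun r =>
        (PySem.List.pyRange 0 N 1).flatMap fun c =>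
          (PySem.List.pyRange 0 K 1).flatMap fun ki =>
            (PySem.List.pyRange 0 K 1).flatMap fun kj =>
              if P r c ki kj then [(r - ki, c - kj)] else []).count (di, dj))
      = ((PySem.List.pyRange 0 N 1).map (fun r =>
          ((PySem.List.pyRange 0 N 1).map (fun c =>
            if 0 ≤ r - di ∧ r - di < K ∧ 0 ≤ c - dj ∧ c - dj < K ∧ P r c (r - di) (c - dj)
            then 1 else 0)).sum)).sum := by
  rw [List.count_flatMap]
  apply congrArg
  apply List.map_congr_left
  intro r _
  simp only [Function.comp_apply]
  rw [List.count_flatMap]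
  apply congrArg
  apply List.map_congr_left
  intro c _
  simp only [Function.comp_apply]
  exact count_inner2 K r c di dj (P r c)

lemma countP_eq_sum_ite (l : List Int) (q : Int → Bool) :
    l.countP q = (l.map fun x => if q x then (1 : Nat) else 0).sum := by
  induction l with
  | nil => rfl
  | cons x xs ih =>
    by_cases h : q x <;> simp [h, ih, Nat.add_comm]

lemma requiredB_eq (lock : List (List Int)) (N : Int) :
    requiredB lock N
      = (((PySem.List.pyRange 0 N 1).map (fun r =>
          ((PySem.List.pyRange 0 N 1).map (fun c =>
            if get2 lock r c ≠ 1 then (1 : Nat) else 0)).sum)).sum : Int) := by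
  unfold requiredB
  rw [List.length_flatMap]
  apply congrArg
  apply congrArg
  apply List.map_congr_left
  intro r _
  rw [← List.countP_eq_length_filter, countP_eq_sum_ite]
  apply congrArg
  apply List.map_congr_left
  intro c _
  by_cases h : get2 lock r c = 1
  · simp [h]
  · simp [h]

lemma cell_iff (v w K si sj r c : Int) :
    ((if si ≤ K - 1 + r ∧ K - 1 + r < si + K ∧ sj ≤ K - 1 + c ∧ K - 1 + c < sj + K
        then v + w else v) = 1)
    ↔ (((if 0 ≤ r - (si - K + 1) ∧ r - (si - K + 1) < K ∧ 0 ≤ c - (sj - K + 1)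
            ∧ c - (sj - K + 1) < K ∧ v + w ≠ 1 then (1 : Nat) else 0) = 0)
      ∧ ((if 0 ≤ r - (si - K + 1) ∧ r - (si - K + 1) < K ∧ 0 ≤ c - (sj - K + 1)
            ∧ c - (sj - K + 1) < K ∧ (v ≠ 1 ∧ v + w = 1) then (1 : Nat) else 0)
          = (if v ≠ 1 then (1 : Nat) else 0))) := by
  by_cases hcov : si ≤ K - 1 + r ∧ K - 1 + r < si + K ∧ sj ≤ K - 1 + c ∧ K - 1 + c < sj + K
  · rw [if_pos hcov]
    by_cases hs : v + w = 1
    · rw [if_neg (fun h => h.2.2.2.2 hs)]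
      by_cases hv : v = 1
      · rw [if_neg (fun h => h.2.2.2.2.1 hv), if_neg (fun h => h hv)]
        simp [hs]
      · rw [if_pos ⟨by omega, by omega, by omega, by omega, hv, hs⟩, if_pos hv]
        simp [hs]
    · rw [if_pos ⟨by omega, by omega, by omega, by omega, hs⟩]
      exact iff_of_false hs (by simp)
  · rw [if_neg hcov,
      if_neg (fun h => hcov ⟨by omega, by omega, by omega, by omega⟩),
      if_neg (fun h => hcov ⟨by omega, by omega, by omega, by omega⟩)]
    by_cases hv : v = 1
    · rw [if_neg (fun h => h hv)]
      simp [hv]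
    · rw [if_pos hv]
      exact iff_of_false hv (by simp)

lemma fitsB_eq_cntB (k lock : List (List Int)) (si sj : Int) :
    fitsB k lock si sj =
      ((PySem.Dict.counter (brkListB k lock (k.length : Int) (lock.length : Int))).getD
          (si - (k.length : Int) + 1, sj - (k.length : Int) + 1) 0 == 0
        && (PySem.Dict.counter (fixListB k lock (k.length : Int) (lock.length : Int))).getD
          (si - (k.length : Int) + 1, sj - (k.length : Int) + 1) 0
            == requiredB lock (lock.length : Int)) := by
  set K : Int := (k.length : Int) with hK
  set N : Int := (lock.length : Int) with hN
  rw [Bool.eq_iff_iff]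
  rw [PySem.Dict.getD_counter, PySem.Dict.getD_counter]
  unfold brkListB fixListB
  rw [count_quad N K (si - K + 1) (sj - K + 1)
      (fun r c ki kj => get2 lock r c + get2 k ki kj ≠ 1),
    count_quad N K (si - K + 1) (sj - K + 1)
      (fun r c ki kj => get2 lock r c ≠ 1 ∧ get2 lock r c + get2 k ki kj = 1),
    requiredB_eq lock N]
  simp only [fitsB, Bool.and_eq_true, beq_iff_eq, Int.natCast_eq_zero, Int.natCast_inj,
    List.all_eq_true, ← hK, ← hN]
  rw [List.sum_eq_zero_iff, List.forall_mem_map,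
    sum_map_eq_iff_of_le _ _ _ (fun r _ => List.sum_le_sum (fun c _ => by
      split_ifs with h1 h2
      · omega
      · exact absurd h1.2.2.2.2.1 h2
      · omega
      · omega))]
  constructor
  · intro hall
    constructor
    · intro r hr
      rw [List.sum_eq_zero_iff, List.forall_mem_map]
      intro c hc
      have := hall r hr c hc
      have e1 : K - 1 + r - si = r - (si - K + 1) := by ring
      have e2 : K - 1 + c - sj = c - (sj - K + 1) := by ring
      rw [e1, e2] at this
      exact ((cell_iff (get2 lock r c) (get2 k (r - (si - K + 1)) (c - (sj - K + 1)))
        K si sj r c).1 this).1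
    · intro r hr
      rw [sum_map_eq_iff_of_le _ _ _ (fun c _ => by
        split_ifs with h1 h2
        · omega
        · exact absurd h1.2.2.2.2.1 h2
        · omega
        · omega)]
      intro c hc
      have := hall r hr c hc
      have e1 : K - 1 + r - si = r - (si - K + 1) := by ring
      have e2 : K - 1 + c - sj = c - (sj - K + 1) := by ring
      rw [e1, e2] at this
      exact ((cell_iff (get2 lock r c) (get2 k (r - (si - K + 1)) (c - (sj - K + 1)))
        K si sj r c).1 this).2
  · rintro ⟨hbrk, hfix⟩ r hr c hc
    have h1 := hbrk r hr
    rw [List.sum_eq_zero_iff, List.forall_mem_map] at h1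
    have h2 := hfix r hr
    rw [sum_map_eq_iff_of_le _ _ _ (fun c _ => by
      split_ifs with ha hb
      · omega
      · exact absurd ha.2.2.2.2.1 hb
      · omega
      · omega)] at h2
    have e1 : K - 1 + r - si = r - (si - K + 1) := by ring
    have e2 : K - 1 + c - sj = c - (sj - K + 1) := by ring
    rw [e1, e2]
    exact (cell_iff (get2 lock r c) (get2 k (r - (si - K + 1)) (c - (sj - K + 1)))
      K si sj r c).2 ⟨h1 c hc, h2 c hc⟩

lemma scanA_eq_anyB (k lock : List (List Int)) (keyLen : Nat)
    (hlen : k.length = keyLen)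
    (hside : 1 ≤ keyLen ∨ lock.length = 0 ∨ (keyLen : Int) + (lock.length : Int) - 1 ≤ 0) :
    scanA k lock ((keyLen : Int) + (lock.length : Int) - 1)
      = (PySem.List.pyRange 0 ((keyLen : Int) + (lock.length : Int) - 1) 1).any (fun si =>
          (PySem.List.pyRange 0 ((keyLen : Int) + (lock.length : Int) - 1) 1).any fun sj =>
            let d := (si - (keyLen : Int) + 1, sj - (keyLen : Int) + 1)
            (PySem.Dict.counter (brkListB k lock (keyLen : Int) (lock.length : Int))).getD d 0 == 0
              && (PySem.Dict.counter (fixListB k lock (keyLen : Int) (lock.length : Int))).getD d 0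
                  == requiredB lock (lock.length : Int)) := by
  subst hlen
  by_cases hend : (k.length : Int) + (lock.length : Int) - 1 ≤ 0
  · unfold scanA
    rw [PySem.List.pyRange_one_eq_nil (by omega)]
    rfl
  · have hK : 1 ≤ k.length ∨ lock.length = 0 := by
      rcases hside with h | h | h
      · exact Or.inl h
      · exact Or.inr h
      · exact absurd h hend
    unfold scanA
    refine PySem.List.any_congr_mem (fun si hsi => ?_)
    have h1 := (PySem.List.mem_pyRange_one).1 hsi
    refine PySem.List.any_congr_mem (fun sj hsj => ?_)
    have h2 := (PySem.List.mem_pyRange_one).1 hsj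
    rw [insertA_eq_fitsB k lock si sj (by omega) (by omega) (by omega) (by omega) hK]
    exact fitsB_eq_cntB k lock si sj

lemma loop_eq (lock : List (List Int)) (keyLen : Nat)
    (hside : 1 ≤ keyLen ∨ lock.length = 0 ∨ (keyLen : Int) + (lock.length : Int) - 1 ≤ 0) :
    ∀ (n : Nat) (k : List (List Int)), k.length = keyLen →
      solLoopA lock ((keyLen : Int) + (lock.length : Int) - 1) k n
        = solLoopB lock (keyLen : Int) (lock.length : Int)
            ((keyLen : Int) + (lock.length : Int) - 1)
            (requiredB lock (lock.length : Int)) k n := by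
  intro n
  induction n with
  | zero => intro k _; rfl
  | succ n ih =>
    intro k hlen
    have hrot : rotB (keyLen : Int) k = rotateA k := by
      rw [rotateA_eq, hlen]
    have hrotlen : (rotB (keyLen : Int) k).length = keyLen := by
      rw [length_rotB]
      omega
    simp only [solLoopA, solLoopB]
    rw [scanA_eq_anyB k lock keyLen hlen hside]
    by_cases hany : (PySem.List.pyRange 0 ((keyLen : Int) + (lock.length : Int) - 1) 1).any
        (fun si => (PySem.List.pyRange 0 ((keyLen : Int) + (lock.length : Int) - 1) 1).any fun sj =>
          let d := (si - (keyLen : Int) + 1, sj - (keyLen : Int) + 1)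
          (PySem.Dict.counter (brkListB k lock (keyLen : Int) (lock.length : Int))).getD d 0 == 0
            && (PySem.Dict.counter (fixListB k lock (keyLen : Int) (lock.length : Int))).getD d 0
                == requiredB lock (lock.length : Int)) = true
    · rw [if_pos hany, if_pos hany]
    · rw [if_neg hany, if_neg hany, ← hrot]
      exact ih (rotB (keyLen : Int) k) hrotlen

lemma main_eq (key lock : List (List Int))
    (hpre : key = [] → lock.length ≤ 1) : solution key lock = solution_alt key lock := by
  have hside : 1 ≤ key.length ∨ lock.length = 0
      ∨ (key.length : Int) + (lock.length : Int) - 1 ≤ 0 := by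
    rcases List.eq_nil_or_concat' key with hk | ⟨_, _, hk⟩
    · have := hpre hk
      subst hk
      right; right
      simp only [List.length_nil, Nat.cast_zero, zero_add]
      omega
    · left
      subst hk
      simp
  exact loop_eq lock key.length hside 4 key rfl

-- ===== VERDICT (by name: the statement is the Claim_ definition above) =====
theorem solution_spec : Claim_equal_solution := by
  intro key lock _ hpre
  unfold Spec_solution
  exact main_eq key lock hpre.1
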